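-- pv_equiv track=rewrite | github.com/Thejus-M/RNAlyze | home/cpgislands.py | calculate_cpg_islands
-- ===== SOURCE A (Python) =====
-- def calculate_cpg_islands(seq):
--     cpg_islands = []
--     num_islands = 0
--     cpg_count = 0
--     in_island = False
--
--     for i in range(len(seq)-1):
--         if seq[i:i+2].upper() == 'CG':
--             cpg_count += 1
--             if not in_island:
--                 in_island = True
--         else:
--             if cpg_count > 0:
--                 cpg_islands.append(cpg_count)
--                 cpg_count = 0
--                 in_island = False
--
--     if cpg_count > 0:
--         cpg_islands.append(cpg_count)
--
--     num_islands = len(cpg_islands)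
--
--     return num_islands
-- ===== SOURCE B (Python) =====
-- def calculate_cpg_islands(seq):
--     # Two 'CG' windows can never overlap/be adjacent, so every island has
--     # length 1 and the island count equals the number of 'CG' occurrences.
--     return seq.upper().count('CG')
-- ===== Notes on version B (the rewrite author's own statement) =====
-- stated objective: simpler
-- what changed: Replaces the flag/accumulator run-length state machine with a direct count of 'CG' occurrences in the uppercased sequence, exploiting that two CG dinucleotides can never be adjacent so every island has length 1.
import Mathlib
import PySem

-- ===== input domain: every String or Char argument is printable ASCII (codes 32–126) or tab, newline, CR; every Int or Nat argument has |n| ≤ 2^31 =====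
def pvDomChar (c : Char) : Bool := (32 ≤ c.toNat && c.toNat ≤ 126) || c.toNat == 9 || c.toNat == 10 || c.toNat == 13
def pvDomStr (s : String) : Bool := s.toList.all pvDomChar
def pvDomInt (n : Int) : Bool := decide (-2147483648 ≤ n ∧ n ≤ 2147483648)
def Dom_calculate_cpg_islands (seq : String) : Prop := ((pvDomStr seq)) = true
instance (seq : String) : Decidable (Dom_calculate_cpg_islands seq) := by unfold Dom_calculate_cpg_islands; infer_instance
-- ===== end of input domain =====

-- B replaces A's flag/accumulator run-length state machine by a direct count of
-- 'CG' occurrences in the uppercased sequence (two CG windows can never be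
-- adjacent, so every island has length 1); objective: simpler.

-- ===== PORT A =====
-- literal port of A: for i in range(len(seq)-1), a run-length accumulator over windows
def calculate_cpg_islands (seq : String) : Int :=
  let st := (PySem.List.pyRange 0 (PySem.Str.len seq - 1) 1).foldl
    (fun (st : List Int × Int × Bool) i =>
      let cpg_islands := st.1
      let cpg_count := st.2.1
      let in_island := st.2.2
      if PySem.Str.upper (PySem.Str.slice seq (some i) (some (i + 2))) = "CG" then
        (cpg_islands, cpg_count + 1, if !in_island then true else in_island)
      else
        if cpg_count > 0 then (cpg_islands ++ [cpg_count], 0, false)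
        else (cpg_islands, cpg_count, in_island))
    ([], 0, false)
  let cpg_islands := if st.2.1 > 0 then st.1 ++ [st.2.1] else st.1
  (cpg_islands.length : Int)

-- ===== PORT B =====
-- literal port of B: seq.upper().count('CG')
def calculate_cpg_islands_alt (seq : String) : Int :=
  (PySem.Str.count (PySem.Str.upper seq) "CG" : Int)

-- ===== PRECONDITION & SPEC =====
def Spec_calculate_cpg_islands (seq : String) (out : Int) : Prop := out = calculate_cpg_islands_alt seq
instance (seq : String) (out : Int) : Decidable (Spec_calculate_cpg_islands seq out) := by unfold Spec_calculate_cpg_islands; infer_instance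

-- ===== CLAIM (what is proved, stated in full; the proofs are below) =====
def Claim_equal_calculate_cpg_islands : Prop := ∀ (seq : String), Dom_calculate_cpg_islands seq → Spec_calculate_cpg_islands seq (calculate_cpg_islands seq)

-- ===== LEMMAS AND PROOFS =====

-- A's step function (definitionally the lambda in calculate_cpg_islands)
def stepA (seq : String) (st : List Int × Int × Bool) (i : Int) : List Int × Int × Bool :=
  let cpg_islands := st.1
  let cpg_count := st.2.1
  let in_island := st.2.2
  if PySem.Str.upper (PySem.Str.slice seq (some i) (some (i + 2))) = "CG" then
    (cpg_islands, cpg_count + 1, if !in_island then true else in_island)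
  else
    if cpg_count > 0 then (cpg_islands ++ [cpg_count], 0, false)
    else (cpg_islands, cpg_count, in_island)

-- window j of l matches 'CG' case-insensitively
def matchW (l : List Char) (j : Nat) : Bool :=
  decide (PySem.Chars.upper ((l.drop j).take 2) = ['C', 'G'])

def pairCG (a b : Char) : Bool :=
  decide (PySem.Chars.upperChar a = 'C' ∧ PySem.Chars.upperChar b = 'G')

-- number of matching windows (overlapping scan)
def winCG : List Char → Nat
  | a :: b :: t => (if pairCG a b then 1 else 0) + winCG (b :: t)
  | _ => 0

-- structural version of Python's non-overlapping str.count for the pattern "CG"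
def cntCG : List Char → Nat
  | a :: b :: t => if a = 'C' ∧ b = 'G' then 1 + cntCG t else cntCG (b :: t)
  | _ => 0

lemma go_eq (fuel : Nat) : ∀ (l : List Char) (acc : Nat), l.length ≤ fuel →
    PySem.Chars.count.go ['C', 'G'] fuel l acc = acc + cntCG l := by
  induction fuel with
  | zero =>
    intro l acc h
    have : l = [] := List.eq_nil_of_length_eq_zero (Nat.le_zero.mp h)
    subst this; simp [PySem.Chars.count.go, cntCG]
  | succ n ih =>
    intro l acc h
    match l with
    | [] => simp [PySem.Chars.count.go, cntCG]
    | [a] =>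
      simp only [PySem.Chars.count.go, List.isPrefixOf]
      have : ('C' == a && false) = false := by simp
      simp [cntCG, ih [] acc (by simp)]
    | a :: b :: t =>
      simp only [PySem.Chars.count.go]
      by_cases hm : a = 'C' ∧ b = 'G'
      · obtain ⟨ha, hb⟩ := hm
        subst ha; subst hb
        have hp : List.isPrefixOf ['C', 'G'] ('C' :: 'G' :: t) = true := by
          simp [List.isPrefixOf]
        rw [hp]
        simp only
        have := ih t (acc + 1) (by simp at h ⊢; omega)
        simp only at this
        simpa [cntCG, this] using by omega
      · have hp : List.isPrefixOf ['C', 'G'] (a :: b :: t) = false := by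
          simp [List.isPrefixOf]
          intro ha hb; exact hm ⟨ha.symm, hb.symm⟩
        rw [hp]
        simp only [Bool.false_eq_true, if_false]
        rw [ih (b :: t) acc (by simp at h ⊢; omega)]
        simp [cntCG, hm]

lemma count_eq_cnt (l : List Char) : PySem.Chars.count l ['C', 'G'] = cntCG l := by
  simp [PySem.Chars.count, go_eq l.length l 0 le_rfl]

lemma cntCG_cons_of_ne (a : Char) (xs : List Char) (h : a ≠ 'C') :
    cntCG (a :: xs) = cntCG xs := by
  cases xs with
  | nil => simp [cntCG]
  | cons b t => simp [cntCG, h]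

lemma upper_G_ne_C (b : Char) (h : PySem.Chars.upperChar b = 'G') :
    PySem.Chars.upperChar b ≠ 'C' := by rw [h]; decide

lemma cnt_upper (l : List Char) : cntCG (PySem.Chars.upper l) = winCG l := by
  induction l with
  | nil => simp [PySem.Chars.upper, cntCG, winCG]
  | cons a l ih =>
    cases l with
    | nil => simp [PySem.Chars.upper, cntCG, winCG]
    | cons b t =>
      simp only [PySem.Chars.upper, List.map] at ih ⊢
      by_cases h : PySem.Chars.upperChar a = 'C' ∧ PySem.Chars.upperChar b = 'G'
      · have hcnt : cntCG (PySem.Chars.upperChar a :: PySem.Chars.upperChar b :: t.map PySem.Chars.upperChar)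
            = 1 + cntCG (t.map PySem.Chars.upperChar) := by simp [cntCG, h]
        have htail : cntCG (PySem.Chars.upperChar b :: t.map PySem.Chars.upperChar)
            = cntCG (t.map PySem.Chars.upperChar) :=
          cntCG_cons_of_ne _ _ (upper_G_ne_C b h.2)
        rw [hcnt, winCG]
        rw [htail] at ih
        simp [pairCG, h, ← ih]
      · have hcnt : cntCG (PySem.Chars.upperChar a :: PySem.Chars.upperChar b :: t.map PySem.Chars.upperChar)
            = cntCG (PySem.Chars.upperChar b :: t.map PySem.Chars.upperChar) := by
          simp only [cntCG]
          rw [if_neg h]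
        rw [hcnt, ih, winCG]
        simp [pairCG, h]

lemma matchW_zero (a b : Char) (t : List Char) :
    matchW (a :: b :: t) 0 = pairCG a b := by
  simp [matchW, pairCG, PySem.Chars.upper, List.take]

lemma matchW_succ_cons (a : Char) (l : List Char) (j : Nat) :
    matchW (a :: l) (j + 1) = matchW l j := by
  simp [matchW]

lemma winCG_eq_countP (l : List Char) :
    winCG l = (List.range (l.length - 1)).countP (matchW l) := by
  induction l with
  | nil => simp [winCG]
  | cons a l ih =>
    cases l with
    | nil => simp [winCG]
    | cons b t =>
      have hlen : (a :: b :: t).length - 1 = t.length + 1 := by simp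
      rw [winCG, hlen, List.range_succ_eq_map]
      rw [List.countP_cons, List.countP_map]
      have hshift : ((matchW (a :: b :: t)) ∘ (· + 1)) = matchW (b :: t) := by
        funext j; simp [Function.comp, matchW_succ_cons]
      have hlen2 : (b :: t).length - 1 = t.length := by simp
      rw [hshift, matchW_zero, ← hlen2, ← ih]
      by_cases h : pairCG a b <;> simp [h, Nat.add_comm]

lemma matchW_adj (l : List Char) (j : Nat) (h : matchW l j = true) :
    matchW l (j + 1) = false := by
  simp only [matchW, decide_eq_true_eq] at h
  have hdj : ∃ x y r, l.drop j = x :: y :: r ∧ PySem.Chars.upperChar x = 'C'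
      ∧ PySem.Chars.upperChar y = 'G' := by
    match hd : l.drop j with
    | [] => rw [hd] at h; simp [PySem.Chars.upper] at h
    | [x] => rw [hd] at h; simp [PySem.Chars.upper, List.take] at h
    | x :: y :: r =>
      rw [hd] at h
      simp only [List.take, PySem.Chars.upper, List.map, List.cons.injEq] at h
      exact ⟨x, y, r, rfl, h.1, h.2.1⟩
  obtain ⟨x, y, r, hd, _, hy⟩ := hdj
  have : l.drop (j + 1) = y :: r := by
    rw [show j + 1 = j + 1 from rfl, ← List.drop_drop, hd]; simp
  simp only [matchW, this, decide_eq_false_iff_not]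
  intro hc
  cases r with
  | nil => simp [PySem.Chars.upper, List.take] at hc
  | cons z r' =>
    simp only [List.take, PySem.Chars.upper, List.map, List.cons.injEq] at hc
    rw [hy] at hc
    exact absurd hc.1 (by decide)

def cVal (l : List Char) (k : Nat) : Int :=
  if 0 < k ∧ matchW l (k - 1) = true then 1 else 0

lemma cond_iff (seq : String) (k : Nat) :
    (PySem.Str.upper (PySem.Str.slice seq (some (k : Int)) (some ((k : Int) + 2))) = "CG")
      ↔ matchW seq.toList k = true := by
  rw [matchW, decide_eq_true_eq]
  constructor
  · intro h
    have := congrArg String.toList h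
    rw [PySem.Str.toList_upper, PySem.Str.toList_slice, PySem.Chars.slice_eq_listSlice] at this
    rw [show ((k : Int) + 2) = (k : Int) + ((2 : Nat) : Int) by norm_num,
      PySem.List.slice_natCast_add] at this
    exact this
  · intro h
    apply String.toList_inj.mp
    rw [PySem.Str.toList_upper, PySem.Str.toList_slice, PySem.Chars.slice_eq_listSlice]
    rw [show ((k : Int) + 2) = (k : Int) + ((2 : Nat) : Int) by norm_num,
      PySem.List.slice_natCast_add]
    exact h

lemma fold_inv (seq : String) (k : Nat) :
    ∃ isl b, (PySem.List.pyRange 0 (k : Int) 1).foldl (stepA seq) ([], 0, false)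
        = (isl, cVal seq.toList k, b)
      ∧ (isl.length : Int) + (if 0 < cVal seq.toList k then 1 else 0)
        = ((List.range k).countP (matchW seq.toList) : Int) := by
  induction k with
  | zero =>
    refine ⟨[], false, ?_, ?_⟩
    · rw [PySem.List.pyRange_one_eq_nil (by norm_num)]
      simp [cVal]
    · simp [cVal]
  | succ k ih =>
    obtain ⟨isl, b, hS, hlen⟩ := ih
    have hr : PySem.List.pyRange 0 ((k + 1 : Nat) : Int) 1
        = PySem.List.pyRange 0 (k : Int) 1 ++ [(k : Int)] := by
      rw [show (((k + 1 : Nat)) : Int) = (k : Int) + 1 by push_cast; ring]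
      exact PySem.List.pyRange_one_succ_right (by positivity)
    rw [hr, List.foldl_append, hS]
    simp only [List.foldl]
    by_cases hm : matchW seq.toList k = true
    · have hc0 : cVal seq.toList k = 0 := by
        unfold cVal
        rcases Nat.eq_zero_or_pos k with hk | hk
        · simp [hk]
        · have : matchW seq.toList (k - 1 + 1) = false → True := fun _ => trivial
          rw [if_neg]
          rintro ⟨-, hprev⟩
          have := matchW_adj seq.toList (k - 1) hprev
          rw [Nat.sub_add_cancel hk] at this
          rw [this] at hm; exact absurd hm (by simp)
      have hc1 : cVal seq.toList (k + 1) = 1 := by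
        unfold cVal
        rw [if_pos ⟨Nat.succ_pos k, by simpa using hm⟩]
      refine ⟨isl, true, ?_, ?_⟩
      · simp only [stepA]
        rw [if_pos ((cond_iff seq k).mpr hm)]
        rw [hc0] at *
        rw [hc1]
        cases b <;> simp
      · rw [hc1, List.range_succ, List.countP_append]
        rw [hc0] at hlen
        simp only [List.countP_cons, List.countP_nil, hm]
        simp only [if_pos (by norm_num : (0:Int) < 1)]
        push_cast
        simp at hlen
        omega
    · have hmf : matchW seq.toList k = false := by simpa using hm
      have hcond : ¬ (PySem.Str.upper (PySem.Str.slice seq (some (k : Int)) (some ((k : Int) + 2))) = "CG") := by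
        rw [cond_iff]; simp [hmf]
      have hc1 : cVal seq.toList (k + 1) = 0 := by
        unfold cVal
        rw [if_neg]; rintro ⟨-, hpc⟩; simp at hpc; rw [hmf] at hpc; exact absurd hpc (by simp)
      have hcount : ((List.range (k+1)).countP (matchW seq.toList) : Int)
          = ((List.range k).countP (matchW seq.toList) : Int) := by
        rw [List.range_succ, List.countP_append]
        simp [hmf]
      by_cases hpos : (0 : Int) < cVal seq.toList k
      · refine ⟨isl ++ [cVal seq.toList k], false, ?_, ?_⟩
        · simp only [stepA]
          rw [if_neg hcond, if_pos hpos, hc1]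
        · rw [hc1, hcount, ← hlen, if_pos hpos]
          simp
      · have hz : cVal seq.toList k = 0 := by
          unfold cVal at hpos ⊢; split_ifs at hpos ⊢ with h1
          · exact absurd (by norm_num) hpos
          · rfl
        refine ⟨isl, b, ?_, ?_⟩
        · simp only [stepA]
          rw [if_neg hcond, hz, if_neg (by norm_num), hc1]
        · rw [hc1, hcount, ← hlen, hz]

lemma alt_eq_win (seq : String) :
    calculate_cpg_islands_alt seq = (winCG seq.toList : Int) := by
  unfold calculate_cpg_islands_alt
  rw [PySem.Str.count]
  rw [show ("CG" : String).toList = ['C', 'G'] from rfl]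
  rw [show (PySem.Str.upper seq).toList = PySem.Chars.upper seq.toList from PySem.Str.toList_upper seq]
  rw [count_eq_cnt, cnt_upper]

-- ===== VERDICT (by name: the statement is the Claim_ definition above) =====
theorem calculate_cpg_islands_spec : Claim_equal_calculate_cpg_islands := by
  intro seq _
  show calculate_cpg_islands seq = calculate_cpg_islands_alt seq
  rw [alt_eq_win, winCG_eq_countP]
  unfold calculate_cpg_islands
  rw [show PySem.Str.len seq = (seq.toList.length : Int) from by
    simp [PySem.Str.len_eq]]
  cases hl : seq.toList.length with
  | zero =>
    rw [show ((0 : Nat) : Int) - 1 = -1 by norm_num,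
      PySem.List.pyRange_one_eq_nil (by norm_num)]
    simp
  | succ m =>
    rw [show ((m + 1 : Nat) : Int) - 1 = (m : Int) by push_cast; ring]
    obtain ⟨isl, b, hS, hlen⟩ := fold_inv seq m
    have hS' : (PySem.List.pyRange 0 (m : Int) 1).foldl
        (fun (st : List Int × Int × Bool) i =>
          let cpg_islands := st.1
          let cpg_count := st.2.1
          let in_island := st.2.2
          if PySem.Str.upper (PySem.Str.slice seq (some i) (some (i + 2))) = "CG" then
            (cpg_islands, cpg_count + 1, if !in_island then true else in_island)
          else
            if cpg_count > 0 then (cpg_islands ++ [cpg_count], 0, false)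
            else (cpg_islands, cpg_count, in_island))
        ([], 0, false) = (isl, cVal seq.toList m, b) := hS
    rw [hS']
    show ((if cVal seq.toList m > 0 then isl ++ [cVal seq.toList m] else isl).length : Int)
      = ((List.range (m + 1 - 1)).countP (matchW seq.toList) : Int)
    rw [show m + 1 - 1 = m from rfl]
    by_cases hpos : (0 : Int) < cVal seq.toList m
    · rw [if_pos hpos]
      rw [if_pos hpos] at hlen
      simp only [List.length_append, List.length_cons, List.length_nil]
      push_cast at hlen ⊢
      omega
    · rw [if_neg hpos]
      rw [if_neg hpos] at hlen
      omega
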